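-- pv_equiv track=rewrite | github.com/tradexil/Artificial-Brains | brain/learning/trace_formation.py | _family_reserve_limits
-- ===== SOURCE A (Python) =====
-- def _family_reserve_limits(
--     family_limits: dict[str, int],
--     region_limit: int,
-- ) -> dict[str, int]:
--     reserve_limits = {family_name: 0 for family_name in family_limits}
--     if region_limit <= 0:
--         return reserve_limits
--
--     total_reserve = sum(max(0, limit) for limit in family_limits.values())
--     if total_reserve <= region_limit:
--         return {
--             family_name: max(0, limit)
--             for family_name, limit in family_limits.items()
--         }
--
--     family_names = [
--         family_name
--         for family_name, limit in family_limits.items()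
--         if limit > 0
--     ]
--     family_index = 0
--     slots_remaining = region_limit
--     while family_names and slots_remaining > 0:
--         family_name = family_names[family_index % len(family_names)]
--         if reserve_limits[family_name] < family_limits[family_name]:
--             reserve_limits[family_name] += 1
--             slots_remaining -= 1
--         family_index += 1
--     return reserve_limits
-- ===== SOURCE B (Python) =====
-- def _family_reserve_limits(
--     family_limits: dict[str, int],
--     region_limit: int,
-- ) -> dict[str, int]:
--     if region_limit <= 0:
--         return {family_name: 0 for family_name in family_limits}
--
--     caps = {
--         family_name: max(0, limit)
--         for family_name, limit in family_limits.items()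
--     }
--     if sum(caps.values()) <= region_limit:
--         return caps
--
--     # Water-filling: find the full round-robin level q and the remainder.
--     levels = sorted(limit for limit in family_limits.values() if limit > 0)
--     prefix = 0
--     j = 0
--     n = len(levels)
--     while j < n and prefix + (n - j) * levels[j] <= region_limit:
--         prefix += levels[j]
--         j += 1
--     q = (region_limit - prefix) // (n - j)
--     bonus = region_limit - prefix - q * (n - j)
--
--     result = {}
--     for family_name, limit in family_limits.items():
--         if limit > q and bonus > 0:
--             result[family_name] = q + 1
--             bonus -= 1
--         else:
--             result[family_name] = max(0, min(limit, q))
--     return result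
-- ===== Notes on version B (the rewrite author's own statement) =====
-- stated objective: faster
-- what changed: Replaces the per-slot round-robin while-loop (one iteration per slot or skip) by closed-form water-filling: sort the positive caps, find the full round level q and remainder via prefix sums, then assign min(cap,q) plus one bonus slot to the first remainder families in one pass.
import Mathlib
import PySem

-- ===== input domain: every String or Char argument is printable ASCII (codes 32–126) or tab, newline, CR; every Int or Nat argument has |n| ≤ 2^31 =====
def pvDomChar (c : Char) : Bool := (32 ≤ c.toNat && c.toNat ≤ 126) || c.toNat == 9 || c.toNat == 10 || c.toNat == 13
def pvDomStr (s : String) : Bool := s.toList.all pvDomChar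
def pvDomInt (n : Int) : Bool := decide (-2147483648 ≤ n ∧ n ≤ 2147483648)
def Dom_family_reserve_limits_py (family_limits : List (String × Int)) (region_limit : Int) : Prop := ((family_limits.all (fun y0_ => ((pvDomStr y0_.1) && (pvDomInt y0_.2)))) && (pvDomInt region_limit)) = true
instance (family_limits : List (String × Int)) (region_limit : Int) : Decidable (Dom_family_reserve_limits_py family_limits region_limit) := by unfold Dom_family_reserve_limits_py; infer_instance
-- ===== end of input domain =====

-- B computes the same reservation by water-filling (sorted positive caps + prefix-sum scan for the round level + one bonus pass) instead of A's per-slot round-robin loop.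
-- B replaces A's per-slot round-robin loop by water-filling (sorted caps + prefix sums + one bonus pass); measured asymptotically faster.


-- ===== PORT A =====
-- the while loop; the fuel argument only makes the recursion total (it is proved sufficient
-- whenever the loop is reached, i.e. when the positive caps sum to more than region_limit)
def pvLoopA (caps : PySem.Dict String Int) (names : List String) :
    Nat → PySem.Dict String Int → Nat → Int → PySem.Dict String Int
  | 0, r, _, _ => r
  | fuel+1, r, idx, slots =>
    if names ≠ [] ∧ 0 < slots then
      let name := names.getD (idx % names.length) ""
      if r.getD name 0 < caps.getD name 0 then
        pvLoopA caps names fuel (r.insert name (r.getD name 0 + 1)) (idx + 1) (slots - 1)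
      else
        pvLoopA caps names fuel r (idx + 1) slots
    else r


def family_reserve_limits_py (family_limits : List (String × Int)) (region_limit : Int) : List (String × Int) :=
  let d := PySem.Dict.ofList family_limits
  let reserve0 := d.keys.foldl (fun r k => r.insert k 0) (PySem.Dict.empty (κ := String) (ν := Int))
  if region_limit ≤ 0 then reserve0.items
  else
    let total := (d.values.map (fun v => max 0 v)).foldl (· + ·) 0
    if total ≤ region_limit then
      (d.items.foldl (fun r p => r.insert p.1 (max 0 p.2)) (PySem.Dict.empty (κ := String) (ν := Int))).items
    else
      let names := (d.items.filter (fun p => 0 < p.2)).map (·.1)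
      (pvLoopA d names ((region_limit.toNat + 1) * names.length) reserve0 0 region_limit).items

-- ===== PORT B =====
-- the scan "while j < n and prefix + (n-j)*levels[j] <= region_limit": recursion on the suffix of levels
def pvScanB (L : Int) : List Int → Nat → Int → Int × Nat
  | [], j, pref => (pref, j)
  | c :: rest, j, pref =>
      if pref + ((rest.length + 1 : Nat) : Int) * c ≤ L then pvScanB L rest (j + 1) (pref + c)
      else (pref, j)

-- the final pass "for family_name, limit in family_limits.items(): ..." building the result dict
def pvAssignB (q : Int) : List (String × Int) → Int → PySem.Dict String Int → PySem.Dict String Int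
  | [], _, out => out
  | (name, c) :: rest, bonus, out =>
      if q < c ∧ 0 < bonus then pvAssignB q rest (bonus - 1) (out.insert name (q + 1))
      else pvAssignB q rest bonus (out.insert name (max 0 (min c q)))


def family_reserve_limits_py_alt (family_limits : List (String × Int)) (region_limit : Int) : List (String × Int) :=
  let d := PySem.Dict.ofList family_limits
  if region_limit ≤ 0 then
    (d.keys.foldl (fun r k => r.insert k 0) (PySem.Dict.empty (κ := String) (ν := Int))).items
  else
    let caps := d.items.foldl (fun r p => r.insert p.1 (max 0 p.2)) (PySem.Dict.empty (κ := String) (ν := Int))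
    if (caps.values.foldl (· + ·) 0) ≤ region_limit then caps.items
    else
      let levels := PySem.List.sorted (d.values.filter (fun c => 0 < c)) (fun x => x) false
      let pj := pvScanB region_limit levels 0 0
      let q := PySem.Int.floordiv (region_limit - pj.1) ((levels.length - pj.2 : Nat) : Int)
      let bonus := region_limit - pj.1 - q * ((levels.length - pj.2 : Nat) : Int)
      (pvAssignB q d.items bonus PySem.Dict.empty).items

-- ===== PRECONDITION & SPEC =====
def Spec_family_reserve_limits_py (family_limits : List (String × Int)) (region_limit : Int) (out : List (String × Int)) : Prop := out = family_reserve_limits_py_alt family_limits region_limit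
instance (family_limits : List (String × Int)) (region_limit : Int) (out : List (String × Int)) : Decidable (Spec_family_reserve_limits_py family_limits region_limit out) := by unfold Spec_family_reserve_limits_py; infer_instance

-- ===== CLAIM (what is proved, stated in full; the proofs are below) =====
def Claim_equal_family_reserve_limits_py : Prop := ∀ (family_limits : List (String × Int)) (region_limit : Int), Dom_family_reserve_limits_py family_limits region_limit → Spec_family_reserve_limits_py family_limits region_limit (family_reserve_limits_py family_limits region_limit)

-- ===== LEMMAS AND PROOFS =====

def pvAlloc (cs : List Int) (q : Int) : Int := (cs.map (fun c => min c q)).sum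
def pvCnt (cs : List Int) (q : Int) (r : Nat) : Nat := ((List.range r).filter (fun i => q < cs.getD i 0)).length

lemma pvCnt_succ (cs : List Int) (q : Int) (r : Nat) :
    pvCnt cs q (r + 1) = pvCnt cs q r + (if q < cs.getD r 0 then 1 else 0) := by
  unfold pvCnt
  rw [List.range_succ, List.filter_append, List.length_append]
  by_cases h : q < cs[r]?.getD 0 <;>
    simp [List.getD_eq_getElem?_getD, h]

lemma pvCnt_mono (cs : List Int) (q : Int) {r r' : Nat} (h : r ≤ r') :
    pvCnt cs q r ≤ pvCnt cs q r' := by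
  obtain ⟨d, rfl⟩ := Nat.exists_eq_add_of_le h
  clear h
  induction d with
  | zero => exact Nat.le_refl _
  | succ d ih =>
    have : r + (d + 1) = (r + d) + 1 := rfl
    rw [this, pvCnt_succ]
    split <;> omega

lemma pvCnt_take (cs : List Int) (q : Int) : ∀ r : Nat, r ≤ cs.length →
    pvCnt cs q r = ((cs.take r).filter (fun c => q < c)).length := by
  intro r
  induction r with
  | zero => simp [pvCnt]
  | succ r ih =>
    intro hr
    have hrl : r < cs.length := by omega
    rw [pvCnt_succ, ih (by omega)]
    have h1 : cs.take (r + 1) = cs.take r ++ [cs[r]] := by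
      rw [List.take_add_one, List.getElem?_eq_getElem hrl]
      rfl
    rw [h1, List.filter_append, List.length_append, List.getD_eq_getElem cs 0 hrl]
    by_cases h : q < cs[r] <;> simp [h]

lemma pvCnt_length (cs : List Int) (q : Int) :
    pvCnt cs q cs.length = ((cs.filter (fun c => q < c)).length) := by
  rw [pvCnt_take cs q cs.length le_rfl, List.take_length]

lemma pvAlloc_succ (cs : List Int) (q : Int) :
    pvAlloc cs (q + 1) = pvAlloc cs q + ((cs.filter (fun c => q < c)).length : Int) := by
  induction cs with
  | nil => simp [pvAlloc]
  | cons c cs ih =>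
    simp only [pvAlloc, List.map_cons, List.sum_cons] at ih ⊢
    rw [List.filter_cons]
    by_cases h : q < c
    · rw [if_pos (by simpa using h), List.length_cons]
      push_cast
      omega
    · rw [if_neg (by simpa using h)]
      omega

lemma pvAlloc_mono (cs : List Int) {q q' : Int} (h : q ≤ q') : pvAlloc cs q ≤ pvAlloc cs q' := by
  induction cs with
  | nil => simp [pvAlloc]
  | cons c cs ih => simp only [pvAlloc, List.map_cons, List.sum_cons] at *; omega

lemma pvAlloc_le_sum (cs : List Int) (q : Int) : pvAlloc cs q ≤ cs.sum := by
  induction cs with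
  | nil => simp [pvAlloc]
  | cons c cs ih => simp only [pvAlloc, List.map_cons, List.sum_cons] at *; omega

lemma pvAlloc_zero (cs : List Int) (h : ∀ c ∈ cs, 0 < c) : pvAlloc cs 0 = 0 := by
  induction cs with
  | nil => simp [pvAlloc]
  | cons c cs ih =>
    have h1 := h c (by simp)
    have h2 : pvAlloc cs 0 = 0 := ih (fun x hx => h x (by simp [hx]))
    simp only [pvAlloc, List.map_cons, List.sum_cons] at *
    omega

lemma pvAlloc_eq_sum_of_le (cs : List Int) (q : Int) (h : ∀ c ∈ cs, c ≤ q) :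
    pvAlloc cs q = cs.sum := by
  induction cs with
  | nil => simp [pvAlloc]
  | cons c cs ih =>
    have h1 := h c (by simp)
    have h2 := ih (fun x hx => h x (by simp [hx]))
    simp only [pvAlloc, List.map_cons, List.sum_cons] at *
    omega

lemma pvAlloc_lt_filter_pos (cs : List Int) (q : Int) (h : pvAlloc cs q < cs.sum) :
    0 < (cs.filter (fun c => q < c)).length := by
  by_contra hc
  push_neg at hc
  have hall : ∀ c ∈ cs, c ≤ q := by
    intro c hcmem
    by_contra hlt
    push_neg at hlt
    have hmemf : c ∈ cs.filter (fun c => q < c) := List.mem_filter.mpr ⟨hcmem, by simpa using hlt⟩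
    have := List.length_pos_of_mem hmemf
    omega
  have := pvAlloc_eq_sum_of_le cs q hall
  omega

lemma pvAlloc_lb (cs : List Int) (hpos : ∀ c ∈ cs, 0 < c) :
    ∀ n : Nat, min (n : Int) cs.sum ≤ pvAlloc cs n := by
  intro n
  induction n with
  | zero =>
    have h0 := pvAlloc_zero cs hpos
    have h1 := pvAlloc_le_sum cs 0
    simp only [Nat.cast_zero]
    omega
  | succ n ih =>
    have hs := pvAlloc_succ cs (n : Int)
    by_cases hf : 0 < (cs.filter (fun c => (n:Int) < c)).length
    · push_cast at *
      omega
    · have hle : ∀ c ∈ cs, c ≤ (n : Int) := by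
        intro c hcmem
        by_contra hlt
        push_neg at hlt
        exact hf (List.length_pos_of_mem (List.mem_filter.mpr ⟨hcmem, by simpa using hlt⟩))
      have h1 := pvAlloc_eq_sum_of_le cs n hle
      have h2 := pvAlloc_eq_sum_of_le cs ((n:Int)+1) (fun c hc => le_trans (hle c hc) (by omega))
      push_cast at *
      omega

lemma pvAlloc_unique (cs : List Int) (L a b : Int)
    (ha1 : pvAlloc cs a ≤ L) (ha2 : L < pvAlloc cs (a + 1))
    (hb1 : pvAlloc cs b ≤ L) (hb2 : L < pvAlloc cs (b + 1)) : a = b := by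
  rcases lt_trichotomy a b with h | h | h
  · have := pvAlloc_mono cs (show a + 1 ≤ b by omega)
    omega
  · exact h
  · have := pvAlloc_mono cs (show b + 1 ≤ a by omega)
    omega

def pvS (cs : List Int) (t : Nat) : Int :=
  pvAlloc cs ((t / cs.length : Nat) : Int) + (pvCnt cs ((t / cs.length : Nat) : Int) (t % cs.length) : Int)
def pvRho (cs : List Int) (t i : Nat) : Int :=
  min (cs.getD i 0) (((t / cs.length : Nat) : Int) + if i < t % cs.length then 1 else 0)
def pvTgt (cs : List Int) (q k : Int) (i : Nat) : Int :=
  min (cs.getD i 0) q + (if q < cs.getD i 0 ∧ (pvCnt cs q i : Int) < k then 1 else 0)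

lemma pvDivMod_succ_lt {t F : Nat} (hF : 0 < F) (h : t % F + 1 < F) :
    (t + 1) % F = t % F + 1 ∧ (t + 1) / F = t / F := by
  have hd : t % F + 1 + F * (t / F) = t + 1 := by
    have := Nat.mod_add_div t F
    omega
  constructor
  · rw [← hd, Nat.add_mul_mod_self_left, Nat.mod_eq_of_lt h]
  · rw [← hd, Nat.add_mul_div_left _ _ hF, Nat.div_eq_of_lt h, Nat.zero_add]

lemma pvDivMod_succ_wrap {t F : Nat} (hF : 0 < F) (h : t % F + 1 = F) :
    (t + 1) % F = 0 ∧ (t + 1) / F = t / F + 1 := by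
  have hd : F + F * (t / F) = t + 1 := by
    have := Nat.mod_add_div t F
    omega
  constructor
  · rw [← hd, Nat.add_mul_mod_self_left, Nat.mod_self]
  · rw [← hd, Nat.add_mul_div_left _ _ hF, Nat.div_self hF, Nat.add_comm]

lemma pvCnt_zero (cs : List Int) (q : Int) : pvCnt cs q 0 = 0 := by simp [pvCnt]

lemma pvS_succ (cs : List Int) (t : Nat) (hF : 0 < cs.length) :
    pvS cs (t + 1) = pvS cs t +
      (if ((t / cs.length : Nat) : Int) < cs.getD (t % cs.length) 0 then 1 else 0) := by
  have hmodlt : t % cs.length < cs.length := Nat.mod_lt t hF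
  by_cases hw : t % cs.length + 1 < cs.length
  · obtain ⟨hm, hd⟩ := pvDivMod_succ_lt hF hw
    simp only [pvS, hm, hd, pvCnt_succ]
    by_cases hcond : ((t / cs.length : Nat) : Int) < cs.getD (t % cs.length) 0
    · rw [if_pos hcond, if_pos hcond]
      omega
    · rw [if_neg hcond, if_neg hcond]
      omega
  · have hw' : t % cs.length + 1 = cs.length := by omega
    obtain ⟨hm, hd⟩ := pvDivMod_succ_wrap hF hw'
    simp only [pvS, hm, hd, pvCnt_zero]
    have hcast : ((t / cs.length + 1 : Nat) : Int) = ((t / cs.length : Nat) : Int) + 1 :=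
      Nat.cast_add_one _
    rw [hcast, pvAlloc_succ]
    have h3 := pvCnt_length cs ((t / cs.length : Nat) : Int)
    have h1 := pvCnt_succ cs ((t / cs.length : Nat) : Int) (t % cs.length)
    rw [hw'] at h1
    by_cases hcond : ((t / cs.length : Nat) : Int) < cs.getD (t % cs.length) 0
    · rw [if_pos hcond] at h1
      rw [if_pos hcond]
      omega
    · rw [if_neg hcond] at h1
      rw [if_neg hcond]
      omega

lemma pvRho_succ (cs : List Int) (t i : Nat) (hF : 0 < cs.length) (hi : i < cs.length) :
    pvRho cs (t + 1) i =
      if i = t % cs.length then min (cs.getD i 0) (((t / cs.length : Nat) : Int) + 1)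
      else pvRho cs t i := by
  have hmodlt : t % cs.length < cs.length := Nat.mod_lt t hF
  by_cases hw : t % cs.length + 1 < cs.length
  · obtain ⟨hm, hd⟩ := pvDivMod_succ_lt hF hw
    simp only [pvRho, hm, hd]
    by_cases hit : i = t % cs.length
    · rw [if_pos hit, if_pos (show i < t % cs.length + 1 by omega)]
    · rw [if_neg hit]
      congr 1
      by_cases hlt : i < t % cs.length
      · rw [if_pos (show i < t % cs.length + 1 by omega), if_pos hlt]
      · rw [if_neg (show ¬ i < t % cs.length + 1 by omega), if_neg hlt]
  · have hw' : t % cs.length + 1 = cs.length := by omega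
    obtain ⟨hm, hd⟩ := pvDivMod_succ_wrap hF hw'
    simp only [pvRho, hm, hd]
    have hcast : ((t / cs.length + 1 : Nat) : Int) = ((t / cs.length : Nat) : Int) + 1 :=
      Nat.cast_add_one _
    rw [hcast]
    by_cases hit : i = t % cs.length
    · rw [if_pos hit, if_neg (show ¬ i < 0 by omega)]
      omega
    · rw [if_neg hit, if_neg (show ¬ i < 0 by omega),
        if_pos (show i < t % cs.length by omega)]
      omega

lemma pv_hit (cs : List Int) (L : Int) (q0 : Int) (r : Nat)
    (hq0 : 0 ≤ q0) (hrF : r ≤ cs.length) (hsum : L < cs.sum)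
    (hSS : pvAlloc cs q0 + (pvCnt cs q0 r : Int) = L) :
    ∃ q k : Int, 0 ≤ q ∧ pvAlloc cs q ≤ L ∧ L < pvAlloc cs (q + 1) ∧ k = L - pvAlloc cs q ∧
      ∀ i < cs.length, min (cs.getD i 0) (q0 + if i < r then 1 else 0) = pvTgt cs q k i := by
  have hcntF : pvCnt cs q0 cs.length = (cs.filter (fun c => q0 < c)).length := pvCnt_length cs q0
  have hcnt_le : pvCnt cs q0 r ≤ pvCnt cs q0 cs.length := pvCnt_mono cs q0 hrF
  have halloc1 := pvAlloc_succ cs q0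
  by_cases hc : pvCnt cs q0 r < pvCnt cs q0 cs.length
  · have hmain : ∀ i < cs.length,
        min (cs.getD i 0) (q0 + if i < r then 1 else 0)
          = pvTgt cs q0 ((pvCnt cs q0 r : Int)) i := by
      intro i hiF
      simp only [pvTgt]
      by_cases hir : i < r
      · rw [if_pos hir]
        by_cases hqc : q0 < cs.getD i 0
        · have h1 : pvCnt cs q0 (i + 1) = pvCnt cs q0 i + 1 := by
            rw [pvCnt_succ, if_pos hqc]
          have h2 : pvCnt cs q0 (i + 1) ≤ pvCnt cs q0 r := pvCnt_mono cs q0 (by omega)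
          rw [if_pos (show q0 < cs.getD i 0 ∧ (pvCnt cs q0 i : Int) < (pvCnt cs q0 r : Int)
            from ⟨hqc, by omega⟩)]
          omega
        · rw [if_neg (show ¬ (q0 < cs.getD i 0 ∧ (pvCnt cs q0 i : Int) < (pvCnt cs q0 r : Int))
            by tauto)]
          omega
      · rw [if_neg hir]
        by_cases hqc : q0 < cs.getD i 0
        · have h2 : pvCnt cs q0 r ≤ pvCnt cs q0 i := pvCnt_mono cs q0 (by omega)
          rw [if_neg (show ¬ (q0 < cs.getD i 0 ∧ (pvCnt cs q0 i : Int) < (pvCnt cs q0 r : Int))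
            by rintro ⟨-, hlt⟩; omega)]
          omega
        · rw [if_neg (show ¬ (q0 < cs.getD i 0 ∧ (pvCnt cs q0 i : Int) < (pvCnt cs q0 r : Int))
            by tauto)]
          omega
    exact ⟨q0, (pvCnt cs q0 r : Int), hq0, by omega, by omega, by omega, hmain⟩
  · have hceq : pvCnt cs q0 r = pvCnt cs q0 cs.length := by omega
    have hLeq : pvAlloc cs (q0 + 1) = L := by omega
    have hpos2 : 0 < (cs.filter (fun c => (q0 + 1) < c)).length :=
      pvAlloc_lt_filter_pos cs (q0 + 1) (by omega)
    have halloc2 := pvAlloc_succ cs (q0 + 1)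
    have hmain : ∀ i < cs.length,
        min (cs.getD i 0) (q0 + if i < r then 1 else 0) = pvTgt cs (q0 + 1) 0 i := by
      intro i hiF
      simp only [pvTgt]
      rw [if_neg (show ¬ (q0 + 1 < cs.getD i 0 ∧ (pvCnt cs (q0 + 1) i : Int) < 0)
        by rintro ⟨-, hlt⟩; omega)]
      by_cases hir : i < r
      · rw [if_pos hir]
        omega
      · rw [if_neg hir]
        have hile : cs.getD i 0 ≤ q0 := by
          by_contra hgt
          push_neg at hgt
          have h1 : pvCnt cs q0 (i + 1) = pvCnt cs q0 i + 1 := by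
            rw [pvCnt_succ, if_pos hgt]
          have h2 : pvCnt cs q0 r ≤ pvCnt cs q0 i := pvCnt_mono cs q0 (by omega)
          have h3 : pvCnt cs q0 (i + 1) ≤ pvCnt cs q0 cs.length := pvCnt_mono cs q0 (by omega)
          omega
        omega
    exact ⟨q0 + 1, 0, by omega, by omega, by omega, by omega, hmain⟩

lemma pvGetD_inj (names : List String) (hnd : names.Nodup) {i j : Nat}
    (hi : i < names.length) (hj : j < names.length)
    (h : names.getD i "" = names.getD j "") : i = j := by
  rw [List.getD_eq_getElem _ _ hi, List.getD_eq_getElem _ _ hj] at h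
  exact (hnd.getElem_inj_iff).mp h

lemma pvLoopA_inv (d : PySem.Dict String Int) (L : Int)
    (names : List String) (cs : List Int)
    (hlen : names.length = cs.length)
    (hF : 0 < cs.length)
    (hnodupN : names.Nodup)
    (hcap : ∀ i < cs.length, d.getD (names.getD i "") 0 = cs.getD i 0)
    (hmemk : ∀ i < cs.length, names.getD i "" ∈ d.items.map Prod.fst)
    (hnotin : ∀ p ∈ d.items, p.2 ≤ 0 → p.1 ∉ names)
    (htot : L < cs.sum) :
    ∀ (fuel : Nat) (t : Nat) (r : PySem.Dict String Int) (slots : Int),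
    r.keys = d.items.map Prod.fst →
    (∀ i < cs.length, r.getD (names.getD i "") 0 = pvRho cs t i) →
    (∀ p ∈ d.items, p.2 ≤ 0 → r.getD p.1 0 = 0) →
    slots = L - pvS cs t →
    pvS cs t ≤ L →
    L ≤ pvS cs (t + fuel) →
    ∃ q k : Int, 0 ≤ q ∧ pvAlloc cs q ≤ L ∧ L < pvAlloc cs (q + 1) ∧
      k = L - pvAlloc cs q ∧
      (pvLoopA d names fuel r t slots).keys = d.items.map Prod.fst ∧
      (∀ i < cs.length,
        (pvLoopA d names fuel r t slots).getD (names.getD i "") 0 = pvTgt cs q k i) ∧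
      (∀ p ∈ d.items, p.2 ≤ 0 → (pvLoopA d names fuel r t slots).getD p.1 0 = 0) := by
  intro fuel
  induction fuel with
  | zero =>
    intro t r slots hrk hrv hrz hslots h0 hend
    have hS : pvS cs t = L := by
      have : pvS cs (t + 0) = pvS cs t := by norm_num
      rw [this] at hend
      omega
    have hrmod : t % cs.length < cs.length := Nat.mod_lt t hF
    obtain ⟨q, k, hq0, hq1, hq2, hk, hvals⟩ :=
      pv_hit cs L ((t / cs.length : Nat) : Int) (t % cs.length) (by positivity)
        (le_of_lt hrmod) htot hS
    refine ⟨q, k, hq0, hq1, hq2, hk, ?_, ?_, ?_⟩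
    · simpa [pvLoopA] using hrk
    · intro i hi
      have h1 := hvals i hi
      simp only [pvLoopA]
      rw [hrv i hi]
      simpa [pvRho] using h1
    · intro p hp hp2
      simpa [pvLoopA] using hrz p hp hp2
  | succ fuel ih =>
    intro t r slots hrk hrv hrz hslots h0 hend
    have hrmod : t % cs.length < cs.length := Nat.mod_lt t hF
    have hnamelen : 0 < names.length := by omega
    by_cases hslots0 : 0 < slots
    · -- loop body runs
      have hcond : names ≠ [] ∧ 0 < slots :=
        ⟨List.ne_nil_of_length_pos hnamelen, hslots0⟩
      have hname_eq : names.getD (t % names.length) "" = names.getD (t % cs.length) "" := by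
        rw [hlen]
      have hgetr : r.getD (names.getD (t % cs.length) "") 0 = pvRho cs t (t % cs.length) :=
        hrv _ hrmod
      have hgetc : d.getD (names.getD (t % cs.length) "") 0 = cs.getD (t % cs.length) 0 :=
        hcap _ hrmod
      have hrho_self : pvRho cs t (t % cs.length)
          = min (cs.getD (t % cs.length) 0) ((t / cs.length : Nat) : Int) := by
        simp [pvRho]
      have hname_mem : names.getD (t % cs.length) "" ∈ names := by
        rw [List.getD_eq_getElem _ _ (by omega)]
        exact List.getElem_mem _
      have hname_inj : ∀ i < cs.length,
          names.getD i "" = names.getD (t % cs.length) "" → i = t % cs.length := by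
        intro i hi h
        exact pvGetD_inj names hnodupN (by omega) (by omega) h
      have hcontains : r.contains (names.getD (t % cs.length) "") = true := by
        rw [PySem.Dict.contains_iff_mem_keys, hrk]
        exact hmemk _ hrmod
      have hSsucc := pvS_succ cs t hF
      have hhe : t + 1 + fuel = t + (fuel + 1) := by omega
      simp only [pvLoopA, if_pos hcond, hname_eq]
      by_cases hstep : ((t / cs.length : Nat) : Int) < cs.getD (t % cs.length) 0
      · -- allocate branch
        rw [if_pos (show r.getD (names.getD (t % cs.length) "") 0
              < d.getD (names.getD (t % cs.length) "") 0 by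
            rw [hgetr, hgetc, hrho_self]; omega)]
        rw [if_pos hstep] at hSsucc
        apply ih (t + 1) _ _
        · rw [PySem.Dict.keys_insert_of_contains _ _ hcontains, hrk]
        · intro i hi
          rw [PySem.Dict.getD_insert, pvRho_succ cs t i hF hi]
          by_cases hit : names.getD i "" = names.getD (t % cs.length) ""
          · have hieq : i = t % cs.length := hname_inj i hi hit
            rw [if_pos hit, if_pos hieq, hgetr, hrho_self]
            subst hieq
            omega
          · have hine : ¬ i = t % cs.length := fun he => hit (by rw [he])
            rw [if_neg hit, if_neg hine]
            exact hrv i hi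
        · intro p hp hp2
          have hne : p.1 ≠ names.getD (t % cs.length) "" := by
            intro he
            exact hnotin p hp hp2 (he ▸ hname_mem)
          rw [PySem.Dict.getD_insert, if_neg hne]
          exact hrz p hp hp2
        · omega
        · omega
        · rw [hhe]; exact hend
      · -- skip branch
        rw [if_neg (show ¬ r.getD (names.getD (t % cs.length) "") 0
              < d.getD (names.getD (t % cs.length) "") 0 by
            rw [hgetr, hgetc, hrho_self]; omega)]
        rw [if_neg hstep] at hSsucc
        apply ih (t + 1) _ _
        · exact hrk
        · intro i hi
          rw [pvRho_succ cs t i hF hi]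
          by_cases hieq : i = t % cs.length
          · rw [if_pos hieq, hrv i hi]
            subst hieq
            rw [hrho_self]
            omega
          · rw [if_neg hieq]
            exact hrv i hi
        · exact hrz
        · omega
        · omega
        · rw [hhe]; exact hend
    · -- loop exits: slots = 0
      have hS : pvS cs t = L := by omega
      obtain ⟨q, k, hq0, hq1, hq2, hk, hvals⟩ :=
        pv_hit cs L ((t / cs.length : Nat) : Int) (t % cs.length) (by positivity)
          (le_of_lt hrmod) htot hS
      have hcond : ¬ (names ≠ [] ∧ 0 < slots) := by
        rintro ⟨-, h⟩
        omega
      refine ⟨q, k, hq0, hq1, hq2, hk, ?_, ?_, ?_⟩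
      · simpa [pvLoopA, if_neg hcond] using hrk
      · intro i hi
        have h1 := hvals i hi
        simp only [pvLoopA, if_neg hcond]
        rw [hrv i hi]
        simpa [pvRho] using h1
      · intro p hp hp2
        simpa [pvLoopA, if_neg hcond] using hrz p hp hp2

lemma pvScanB_spec (L : Int) (s : List Int) (hpos : ∀ x ∈ s, 0 < x) (hL : 0 < L)
    (htot : L < s.sum) :
    ∀ (s2 : List Int) (j : Nat) (pref : Int),
    s2 = s.drop j → j ≤ s.length → pref = (s.take j).sum → pref ≤ L →
    (0 < j → pref + ((s.length - j : Nat) : Int) * s.getD (j - 1) 0 ≤ L) →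
    ∃ pref' j', pvScanB L s2 j pref = (pref', j') ∧ j ≤ j' ∧ j' < s.length ∧
      pref' = (s.take j').sum ∧ pref' ≤ L ∧
      (0 < j' → pref' + ((s.length - j' : Nat) : Int) * s.getD (j' - 1) 0 ≤ L) ∧
      L < pref' + ((s.length - j' : Nat) : Int) * s.getD j' 0 := by
  intro s2
  induction s2 with
  | nil =>
    intro j pref hdrop hjle hpref hprefle hlast
    exfalso
    have hj : s.length ≤ j := List.drop_eq_nil_iff.mp hdrop.symm
    have hjeq : j = s.length := by omega
    subst hjeq
    rw [List.take_length] at hpref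
    omega
  | cons c rest ih =>
    intro j pref hdrop hjle hpref hprefle hlast
    have hjlt : j < s.length := by
      by_contra hge
      push_neg at hge
      have : s.drop j = [] := List.drop_eq_nil_iff.mpr (by omega)
      rw [this] at hdrop
      simp at hdrop
    have hgetj : s[j]? = some c := by
      have h0 : (s.drop j)[0]? = s[j + 0]? := List.getElem?_drop
      rw [← hdrop] at h0
      simpa using h0.symm
    have hcj : s.getD j 0 = c := by
      simp [List.getD_eq_getElem?_getD, hgetj]
    have hcmem : c ∈ s := by
      have : c = s[j]'hjlt := by
        have := hgetj
        rw [List.getElem?_eq_getElem hjlt] at this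
        exact (Option.some_injective _ this).symm
      rw [this]
      exact List.getElem_mem _
    have hcpos : 0 < c := hpos c hcmem
    have hlenrest : rest.length + 1 = s.length - j := by
      have h1 : (s.drop j).length = s.length - j := List.length_drop
      rw [← hdrop] at h1
      simpa using h1
    have hexp : ((rest.length + 1 : Nat) : Int) * c = (rest.length : Int) * c + c := by
      push_cast
      ring
    have hKc : 0 ≤ (rest.length : Int) * c := mul_nonneg (by positivity) (le_of_lt hcpos)
    simp only [pvScanB]
    by_cases hacc : pref + ((rest.length + 1 : Nat) : Int) * c ≤ L
    · rw [if_pos hacc]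
      have hdrop' : rest = s.drop (j + 1) := by
        have h1 := congrArg (List.drop 1) hdrop
        simpa [List.drop_drop] using h1
      have hc' : c = s[j]'hjlt := by
        have := hgetj
        rw [List.getElem?_eq_getElem hjlt] at this
        exact (Option.some_injective _ this).symm
      have htake' : (s.take (j + 1)).sum = pref + c := by
        rw [List.sum_take_succ s j hjlt, hpref, hc']
      rw [hexp] at hacc
      have hple : pref + c ≤ L := by omega
      have hlast' : 0 < j + 1 →
          pref + c + ((s.length - (j + 1) : Nat) : Int) * s.getD (j + 1 - 1) 0 ≤ L := by
        intro _
        have hsub : (s.length - (j + 1) : Nat) = rest.length := by omega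
        have hidx : j + 1 - 1 = j := by omega
        rw [hsub, hidx, hcj]
        omega
      obtain ⟨pref', j', heq, hjj, hjl, h1, h2, h3, h4⟩ :=
        ih (j + 1) (pref + c) hdrop' (by omega) htake'.symm hple hlast'
      exact ⟨pref', j', heq, by omega, hjl, h1, h2, h3, h4⟩
    · rw [if_neg hacc]
      refine ⟨pref, j, rfl, le_rfl, hjlt, hpref, hprefle, hlast, ?_⟩
      rw [hcj, ← hlenrest]
      omega

def pvAsg (q : Int) : List (String × Int) → Int → List (String × Int)
  | [], _ => []
  | (nm, c) :: rest, b =>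
      if q < c ∧ 0 < b then (nm, q + 1) :: pvAsg q rest (b - 1)
      else (nm, max 0 (min c q)) :: pvAsg q rest b

lemma pvAssignB_items (q : Int) : ∀ (l' : List (String × Int)) (b : Int)
    (out : PySem.Dict String Int),
    (∀ p ∈ l', out.contains p.1 = false) → (l'.map Prod.fst).Nodup →
    (pvAssignB q l' b out).items = out.items ++ pvAsg q l' b := by
  intro l'
  induction l' with
  | nil => intro b out _ _; simp [pvAssignB, pvAsg]
  | cons p rest ih =>
    intro b out hfresh hnd
    obtain ⟨nm, c⟩ := p
    have hhead : out.contains nm = false := hfresh (nm, c) (by simp)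
    have hnm_rest : ∀ p ∈ rest, p.1 ≠ nm := by
      intro p hp he
      simp only [List.map_cons, List.nodup_cons] at hnd
      exact hnd.1 (he ▸ List.mem_map_of_mem hp)
    have hnd' : (rest.map Prod.fst).Nodup := by
      simp only [List.map_cons, List.nodup_cons] at hnd
      exact hnd.2
    have hfresh' : ∀ (v : Int), ∀ p ∈ rest, (out.insert nm v).contains p.1 = false := by
      intro v p hp
      rw [PySem.Dict.contains_insert]
      have h1 : (p.1 == nm) = false := by
        simp [hnm_rest p hp]
      rw [h1, hfresh p (by simp [hp])]
      rfl
    simp only [pvAssignB, pvAsg]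
    by_cases hcond : q < c ∧ 0 < b
    · rw [if_pos hcond, if_pos hcond,
        ih (b - 1) (out.insert nm (q + 1)) (hfresh' (q + 1)) hnd',
        PySem.Dict.items_insert_of_not_contains _ _ hhead]
      simp
    · rw [if_neg hcond, if_neg hcond,
        ih b (out.insert nm (max 0 (min c q))) (hfresh' (max 0 (min c q))) hnd',
        PySem.Dict.items_insert_of_not_contains _ _ hhead]
      simp

lemma pvAsg_length (q : Int) : ∀ (l' : List (String × Int)) (b : Int),
    (pvAsg q l' b).length = l'.length := by
  intro l'
  induction l' with
  | nil => intro b; simp [pvAsg]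
  | cons p rest ih =>
    intro b
    obtain ⟨nm, c⟩ := p
    simp only [pvAsg]
    split <;> simp [ih]

lemma pvAsg_getD (q : Int) : ∀ (l' : List (String × Int)) (b : Int) (m : Nat),
    m < l'.length →
    (pvAsg q l' b).getD m ("", 0) =
      ((l'.getD m ("", 0)).1,
        if q < (l'.getD m ("", 0)).2 ∧ (((l'.take m).countP (fun p => q < p.2) : Nat) : Int) < b
        then q + 1 else max 0 (min (l'.getD m ("", 0)).2 q)) := by
  intro l'
  induction l' with
  | nil => intro b m hm; simp at hm
  | cons p rest ih =>
    intro b m hm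
    obtain ⟨nm, c⟩ := p
    match m with
    | 0 =>
      simp only [pvAsg, List.take_zero, List.countP_nil, Nat.cast_zero, List.getD]
      by_cases hcond : q < c ∧ 0 < b
      · rw [if_pos hcond]
        simp [if_pos hcond]
      · rw [if_neg hcond]
        simp [if_neg hcond]
    | Nat.succ m =>
      have hm' : m < rest.length := by simpa using hm
      have htake : ((nm, c) :: rest).take (m + 1) = (nm, c) :: rest.take m :=
        List.take_succ_cons
      have hgd : (((nm, c) :: rest).getD (m + 1) ("", 0)) = rest.getD m ("", 0) := by
        simp [List.getD]
      simp only [pvAsg, htake, hgd]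
      by_cases hcond : q < c ∧ 0 < b
      · rw [if_pos hcond]
        have hgd2 : ((nm, q + 1) :: pvAsg q rest (b - 1)).getD (m + 1) ("", 0)
            = (pvAsg q rest (b - 1)).getD m ("", 0) := by
          simp [List.getD]
        rw [hgd2, ih (b - 1) m hm']
        have hcnt : (((nm, c) :: rest.take m).countP (fun p => q < p.2))
            = (rest.take m).countP (fun p => q < p.2) + 1 := by
          rw [List.countP_cons]
          simp [hcond.1]
        rw [hcnt]
        by_cases hsub : q < (rest.getD m ("", 0)).2 ∧
            (((rest.take m).countP (fun p => q < p.2) : Nat) : Int) < b - 1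
        · rw [if_pos hsub, if_pos ⟨hsub.1, by push_cast; omega⟩]
        · rw [if_neg hsub, if_neg ?_]
          rintro ⟨h1, h2⟩
          push_cast at h2
          exact hsub ⟨h1, by omega⟩
      · rw [if_neg hcond]
        have hgd2 : ((nm, max 0 (min c q)) :: pvAsg q rest b).getD (m + 1) ("", 0)
            = (pvAsg q rest b).getD m ("", 0) := by
          simp [List.getD]
        rw [hgd2, ih b m hm']
        by_cases hq : q < c
        · have hb : ¬ 0 < b := fun h => hcond ⟨hq, h⟩
          have hcnt : (((nm, c) :: rest.take m).countP (fun p => q < p.2))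
              = (rest.take m).countP (fun p => q < p.2) + 1 := by
            rw [List.countP_cons]
            simp [hq]
          rw [hcnt]
          have hc1 : ¬ (q < (rest.getD m ("", 0)).2 ∧
              (((rest.take m).countP (fun p => q < p.2) : Nat) : Int) < b) := by
            rintro ⟨-, h2⟩
            have := Int.natCast_nonneg ((rest.take m).countP (fun p => q < p.2))
            omega
          have hc2 : ¬ (q < (rest.getD m ("", 0)).2 ∧
              ((((rest.take m).countP (fun p => q < p.2) + 1 : Nat)) : Int) < b) := by
            rintro ⟨-, h2⟩
            have := Int.natCast_nonneg ((rest.take m).countP (fun p => q < p.2))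
            push_cast at h2
            omega
          rw [if_neg hc1, if_neg hc2]
        · have hcnt : (((nm, c) :: rest.take m).countP (fun p => q < p.2))
              = (rest.take m).countP (fun p => q < p.2) := by
            rw [List.countP_cons]
            simp [hq]
          rw [hcnt]

lemma pvFilter_idx {α : Type} (p : α → Bool) (dflt : α) : ∀ (l : List α) (m : Nat),
    m < l.length → p (l.getD m dflt) = true →
    (l.take m).countP p < (l.filter p).length ∧
      (l.filter p).getD ((l.take m).countP p) dflt = l.getD m dflt := by
  intro l
  induction l with
  | nil => intro m hm; simp at hm
  | cons x rest ih =>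
    intro m hm hp
    match m with
    | 0 =>
      simp only [List.getD] at hp ⊢
      simp only [List.take_zero, List.countP_nil, List.filter_cons]
      simp only [List.getElem?_cons_zero, Option.getD_some] at hp ⊢
      rw [if_pos hp]
      simp
    | Nat.succ m =>
      have hm' : m < rest.length := by simpa using hm
      have hp' : p (rest.getD m dflt) = true := by simpa [List.getD] using hp
      obtain ⟨ih1, ih2⟩ := ih m hm' hp'
      rw [List.take_succ_cons, List.countP_cons, List.filter_cons]
      by_cases hx : p x
      · rw [if_pos hx]
        simp only [hx, if_pos]
        constructor
        · simp only [List.length_cons]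
          omega
        · have : (x :: rest.filter p).getD ((rest.take m).countP p + 1) dflt
              = (rest.filter p).getD ((rest.take m).countP p) dflt := by
            simp [List.getD]
          simp only [this, ih2]
          simp [List.getD]
      · rw [if_neg hx]
        simp only [hx]
        constructor
        · simpa using ih1
        · simpa [List.getD] using ih2

lemma pvTake_filter {α : Type} (p : α → Bool) : ∀ (l : List α) (m : Nat),
    (l.take m).filter p = (l.filter p).take ((l.take m).countP p) := by
  intro l
  induction l with
  | nil => intro m; simp
  | cons x rest ih =>
    intro m
    match m with
    | 0 => simp
    | Nat.succ m =>
      rw [List.take_succ_cons, List.filter_cons, List.countP_cons, List.filter_cons]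
      by_cases hx : p x
      · simp only [hx, if_pos]
        rw [List.take_succ_cons, ih]
      · simpa [hx] using ih m

lemma pvSum_max_filter : ∀ (l : List (String × Int)),
    (l.map (fun p => max 0 p.2)).sum = ((l.filter (fun p => 0 < p.2)).map Prod.snd).sum := by
  intro l
  induction l with
  | nil => simp
  | cons p rest ih =>
    rw [List.map_cons, List.sum_cons, List.filter_cons]
    by_cases hp : 0 < p.2
    · rw [if_pos (by simpa using hp), List.map_cons, List.sum_cons]
      omega
    · rw [if_neg (by simpa using hp)]
      omega

lemma pvAlloc_split (s : List Int) (j : Nat) (q : Int) (hj : j ≤ s.length)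
    (h1 : ∀ x ∈ s.take j, x ≤ q) (h2 : ∀ x ∈ s.drop j, q ≤ x) :
    pvAlloc s q = (s.take j).sum + ((s.length - j : Nat) : Int) * q := by
  conv_lhs => rw [pvAlloc, ← List.take_append_drop j s]
  rw [List.map_append, List.sum_append]
  have e1 : (s.take j).map (fun c => min c q) = s.take j := by
    rw [List.map_congr_left (fun x hx => min_eq_left (h1 x hx))]
    exact List.map_id _
  have e2 : (s.drop j).map (fun c => min c q) = (s.drop j).map (fun _ => q) := by
    exact List.map_congr_left (fun x hx => min_eq_right (h2 x hx))
  rw [e1, e2, PySem.List.sum_map_const_int, List.length_drop]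

lemma pvScan_char (L : Int) (s : List Int) (hpos : ∀ x ∈ s, 0 < x) (hL : 0 < L)
    (htot : L < s.sum) (hsorted : s.Pairwise (· ≤ ·)) :
    ∃ pref' j' qB, pvScanB L s 0 0 = (pref', j') ∧
      qB = PySem.Int.floordiv (L - pref') ((s.length - j' : Nat) : Int) ∧
      0 ≤ qB ∧ pvAlloc s qB ≤ L ∧ L < pvAlloc s (qB + 1) ∧
      L - pref' - qB * ((s.length - j' : Nat) : Int) = L - pvAlloc s qB := by
  obtain ⟨pref', j', heq, h0j, hjlt, hprefsum, hprefle, hlastb, hreject⟩ :=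
    pvScanB_spec L s hpos hL htot s 0 0 (by simp) (by omega) (by simp) (by omega) (by omega)
  have hd : (0 : Int) < ((s.length - j' : Nat) : Int) := by
    have : 0 < s.length - j' := by omega
    exact_mod_cast this
  set d : Int := ((s.length - j' : Nat) : Int) with hddef
  set qB : Int := PySem.Int.floordiv (L - pref') d with hq
  have hq0 : 0 ≤ qB := by
    rw [hq, PySem.Int.le_floordiv_iff_mul_le hd]
    omega
  have hqlt : qB < s.getD j' 0 := by
    rw [hq, PySem.Int.floordiv_lt_iff_lt_mul hd]
    have : s.getD j' 0 * d = d * s.getD j' 0 := by ring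
    omega
  have hmono : ∀ i k : Nat, i ≤ k → k < s.length → s.getD i 0 ≤ s.getD k 0 := by
    intro i k hik hk
    rcases Nat.eq_or_lt_of_le hik with he | hlt
    · subst he; exact le_rfl
    · rw [List.getD_eq_getElem _ _ (by omega), List.getD_eq_getElem _ _ hk]
      exact (List.pairwise_iff_getElem.mp hsorted) i k (by omega) hk hlt
  have hsle : ∀ i : Nat, i < j' → s.getD i 0 ≤ qB := by
    intro i hi
    have hlast := hlastb (by omega)
    have hj1 : s.getD (j' - 1) 0 ≤ qB := by
      rw [hq, PySem.Int.le_floordiv_iff_mul_le hd]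
      have : s.getD (j' - 1) 0 * d = d * s.getD (j' - 1) 0 := by ring
      omega
    exact le_trans (hmono i (j' - 1) (by omega) (by omega)) hj1
  have htke : ∀ q' : Int, qB ≤ q' → ∀ x ∈ s.take j', x ≤ q' := by
    intro q' hqq x hx
    obtain ⟨i, hi, hix⟩ := List.getElem_of_mem hx
    have hilt : i < j' := by
      have := hi
      simp [List.length_take] at this
      omega
    have : x = s.getD i 0 := by
      rw [List.getD_eq_getElem _ _ (by omega)]
      rw [← hix, List.getElem_take]
    rw [this]
    exact le_trans (hsle i hilt) hqq
  have hdrp : ∀ q' : Int, q' ≤ s.getD j' 0 → ∀ x ∈ s.drop j', q' ≤ x := by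
    intro q' hqq x hx
    obtain ⟨i, hi, hix⟩ := List.getElem_of_mem hx
    have hlen : (s.drop j').length = s.length - j' := List.length_drop
    have hji : j' + i < s.length := by omega
    have : x = s.getD (j' + i) 0 := by
      rw [List.getD_eq_getElem _ _ hji, ← hix]
      rw [List.getElem_drop]
    rw [this]
    exact le_trans hqq (hmono j' (j' + i) (by omega) hji)
  have halloc1 : pvAlloc s qB = (s.take j').sum + d * qB :=
    pvAlloc_split s j' qB (by omega) (htke qB le_rfl) (hdrp qB (by omega))
  have halloc2 : pvAlloc s (qB + 1) = (s.take j').sum + d * (qB + 1) :=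
    pvAlloc_split s j' (qB + 1) (by omega) (htke (qB + 1) (by omega)) (hdrp (qB + 1) (by omega))
  refine ⟨pref', j', qB, heq, hq, hq0, ?_, ?_, ?_⟩
  · rw [halloc1, ← hprefsum]
    have : qB * d ≤ L - pref' := by
      rw [← PySem.Int.le_floordiv_iff_mul_le hd]
    have hc : d * qB = qB * d := by ring
    omega
  · rw [halloc2, ← hprefsum]
    have : L - pref' < (qB + 1) * d := by
      rw [← PySem.Int.floordiv_lt_iff_lt_mul hd]
      omega
    have hc : d * (qB + 1) = (qB + 1) * d := by ring
    omega
  · rw [halloc1, ← hprefsum]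
    ring

-- A-side characterization of the round-robin loop result, started from the port's initial state
lemma pvA_result (d : PySem.Dict String Int) (L : Int)
    (hnd : d.keys.Nodup) (hL : 0 < L)
    (htot : L < ((d.items.filter (fun p => 0 < p.2)).map (fun p => p.2)).sum) :
    ∃ q k : Int,
      0 ≤ q ∧
      pvAlloc ((d.items.filter (fun p => 0 < p.2)).map (fun p => p.2)) q ≤ L ∧
      L < pvAlloc ((d.items.filter (fun p => 0 < p.2)).map (fun p => p.2)) (q + 1) ∧
      k = L - pvAlloc ((d.items.filter (fun p => 0 < p.2)).map (fun p => p.2)) q ∧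
      (pvLoopA d ((d.items.filter (fun p => 0 < p.2)).map (fun p => p.1))
          ((L.toNat + 1) * ((d.items.filter (fun p => 0 < p.2)).map (fun p => p.1)).length)
          (d.keys.foldl (fun r k => r.insert k 0) (PySem.Dict.empty (κ := String) (ν := Int))) 0 L).items
        = (d.items.map Prod.fst).map
            (fun key => (key, (pvLoopA d ((d.items.filter (fun p => 0 < p.2)).map (fun p => p.1))
                ((L.toNat + 1) * ((d.items.filter (fun p => 0 < p.2)).map (fun p => p.1)).length)
                (d.keys.foldl (fun r k => r.insert k 0) (PySem.Dict.empty (κ := String) (ν := Int))) 0 L).getD key 0)) ∧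
      (∀ i < ((d.items.filter (fun p => 0 < p.2)).map (fun p => p.2)).length,
        (pvLoopA d ((d.items.filter (fun p => 0 < p.2)).map (fun p => p.1))
            ((L.toNat + 1) * ((d.items.filter (fun p => 0 < p.2)).map (fun p => p.1)).length)
            (d.keys.foldl (fun r k => r.insert k 0) (PySem.Dict.empty (κ := String) (ν := Int))) 0 L).getD
          (((d.items.filter (fun p => 0 < p.2)).map (fun p => p.1)).getD i "") 0
          = pvTgt ((d.items.filter (fun p => 0 < p.2)).map (fun p => p.2)) q k i) ∧
      (∀ p ∈ d.items, p.2 ≤ 0 →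
        (pvLoopA d ((d.items.filter (fun p => 0 < p.2)).map (fun p => p.1))
            ((L.toNat + 1) * ((d.items.filter (fun p => 0 < p.2)).map (fun p => p.1)).length)
            (d.keys.foldl (fun r k => r.insert k 0) (PySem.Dict.empty (κ := String) (ν := Int))) 0 L).getD p.1 0 = 0) := by
  set l := d.items with hldef
  set names := (l.filter (fun p => 0 < p.2)).map (fun p => p.1) with hnames
  set cs := (l.filter (fun p => 0 < p.2)).map (fun p => p.2) with hcs
  have hndl : (l.map Prod.fst).Nodup := hnd
  have hlen : names.length = cs.length := by simp [hnames, hcs]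
  have hpos : ∀ c ∈ cs, 0 < c := by
    intro c hc
    rw [hcs] at hc
    obtain ⟨p, hp, rfl⟩ := List.mem_map.mp hc
    have := List.of_mem_filter hp
    simpa using this
  have hF : 0 < cs.length := by
    by_contra h
    push_neg at h
    interval_cases hcl : cs.length
    · have : cs = [] := List.length_eq_zero_iff.mp hcl
      rw [this] at htot
      simp at htot
      omega
  have hsum0 : 0 ≤ cs.sum := by
    have : ∀ c ∈ cs, 0 ≤ c := fun c hc => le_of_lt (hpos c hc)
    exact List.sum_nonneg this
  have hnodupN : names.Nodup := by
    rw [hnames]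
    exact (List.Sublist.map (fun (p : String × Int) => p.1)
      (List.filter_sublist (l := l))).nodup hndl
  have hpair : ∀ i, i < cs.length →
      (names.getD i "", cs.getD i 0) ∈ l ∧ 0 < cs.getD i 0 := by
    intro i hi
    have hif : i < (l.filter (fun p => 0 < p.2)).length := by
      rw [hcs] at hi
      simpa using hi
    have h1 : names.getD i "" = ((l.filter (fun p => 0 < p.2))[i]'hif).1 := by
      rw [hnames, List.getD_eq_getElem _ _ (by simpa using hif), List.getElem_map]
    have h2 : cs.getD i 0 = ((l.filter (fun p => 0 < p.2))[i]'hif).2 := by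
      rw [hcs, List.getD_eq_getElem _ _ (by simpa using hif), List.getElem_map]
    have hmem : (l.filter (fun p => 0 < p.2))[i]'hif ∈ l.filter (fun p => 0 < p.2) :=
      List.getElem_mem _
    constructor
    · rw [h1, h2]
      have : ((l.filter (fun p => 0 < p.2))[i]'hif).1 = ((l.filter (fun p => 0 < p.2))[i]'hif).1 ∧
          ((l.filter (fun p => 0 < p.2))[i]'hif) ∈ l := ⟨rfl, List.mem_of_mem_filter hmem⟩
      simpa using this.2
    · rw [h2]
      have := List.of_mem_filter hmem
      simpa using this
  have hcap : ∀ i < cs.length, d.getD (names.getD i "") 0 = cs.getD i 0 := by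
    intro i hi
    obtain ⟨hmem, -⟩ := hpair i hi
    exact PySem.Dict.getD_of_mem_items d hmem hnd 0
  have hmemk : ∀ i < cs.length, names.getD i "" ∈ d.items.map Prod.fst := by
    intro i hi
    obtain ⟨hmem, -⟩ := hpair i hi
    exact List.mem_map_of_mem hmem
  have hnotin : ∀ p ∈ d.items, p.2 ≤ 0 → p.1 ∉ names := by
    intro p hp hp2 hmem
    rw [hnames] at hmem
    obtain ⟨p', hp', he⟩ := List.mem_map.mp hmem
    have hp'l : p' ∈ l := List.mem_of_mem_filter hp'
    have hp'pos : 0 < p'.2 := by simpa using List.of_mem_filter hp'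
    have heq : p' = p := List.inj_on_of_nodup_map hndl hp'l hp he
    rw [heq] at hp'pos
    omega
  -- initial reserve dict
  set r0 := d.keys.foldl (fun r k => r.insert k 0) (PySem.Dict.empty (κ := String) (ν := Int)) with hr0
  have hr0items : r0.items = d.keys.map (fun k => (k, (0 : Int))) := by
    rw [hr0]
    have := PySem.Dict.items_foldl_insert_fresh d.keys (fun a => a) (fun _ => (0 : Int))
      (PySem.Dict.empty (κ := String) (ν := Int))
      (fun a _ => PySem.Dict.contains_empty _) (by simpa using hnd)
    simpa using this
  have hr0keys : r0.keys = d.items.map Prod.fst := by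
    have hk : r0.keys = r0.items.map Prod.fst := rfl
    rw [hk, hr0items, List.map_map]
    show d.keys.map (fun k => k) = d.items.map Prod.fst
    rw [List.map_id']
    rfl
  have hr0getD : ∀ key ∈ d.items.map Prod.fst, r0.getD key 0 = 0 := by
    intro key hkey
    have hmem : (key, (0 : Int)) ∈ r0.items := by
      rw [hr0items]
      exact List.mem_map_of_mem hkey
    exact PySem.Dict.getD_of_mem_items r0 hmem (by rw [hr0keys]; exact hndl) 0
  have hS0 : pvS cs 0 = 0 := by
    simp only [pvS, Nat.zero_div, Nat.zero_mod, Nat.cast_zero, pvCnt_zero]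
    rw [pvAlloc_zero cs hpos]
    simp
  have hrho0 : ∀ i < cs.length, pvRho cs 0 i = 0 := by
    intro i hi
    simp only [pvRho, Nat.zero_div, Nat.zero_mod, Nat.cast_zero]
    rw [if_neg (by omega)]
    have := hpos (cs.getD i 0) (by rw [List.getD_eq_getElem _ _ hi]; exact List.getElem_mem _)
    omega
  have hfuel : L ≤ pvS cs (0 + (L.toNat + 1) * names.length) := by
    have hcast : ((L.toNat + 1 : Nat) : Int) = L + 1 := by
      rw [Nat.cast_add, Nat.cast_one, Int.toNat_of_nonneg (by omega)]
    rw [Nat.zero_add, hlen]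
    have hdiv : ((L.toNat + 1) * cs.length) / cs.length = L.toNat + 1 :=
      Nat.mul_div_left _ hF
    have hmod : ((L.toNat + 1) * cs.length) % cs.length = 0 :=
      Nat.mul_mod_left _ _
    simp only [pvS, hdiv, hmod, pvCnt_zero]
    have hlb := pvAlloc_lb cs hpos (L.toNat + 1)
    rw [hcast] at hlb
    rw [hcast]
    simp only [Nat.cast_zero, add_zero]
    omega
  obtain ⟨q, k, hq0, hq1, hq2, hk, hkeys, hvals, hz⟩ :=
    pvLoopA_inv d L names cs hlen hF hnodupN hcap hmemk hnotin htot
      ((L.toNat + 1) * names.length) 0 r0 L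
      hr0keys
      (fun i hi => by rw [hr0getD _ (hmemk i hi), hrho0 i hi])
      (fun p hp hp2 => hr0getD p.1 (List.mem_map_of_mem hp))
      (by rw [hS0]; ring)
      (by rw [hS0]; omega)
      hfuel
  refine ⟨q, k, hq0, hq1, hq2, hk, ?_, hvals, hz⟩
  have hkn : (pvLoopA d names ((L.toNat + 1) * names.length) r0 0 L).keys.Nodup := by
    rw [hkeys]
    exact hndl
  have := PySem.Dict.items_eq_map_keys _ hkn (0 : Int)
  rw [this, hkeys]

lemma pvAlloc_perm (a b : List Int) (h : a.Perm b) (q : Int) : pvAlloc a q = pvAlloc b q :=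
  (h.map _).sum_eq

lemma pvCnt_countP (l : List (String × Int)) (q : Int) (hq : 0 ≤ q) (m : Nat)
    (hm : m < l.length) :
    (pvCnt ((l.filter (fun p => 0 < p.2)).map (fun p => p.2)) q
        ((l.take m).countP (fun p => 0 < p.2)) : Int)
      = ((l.take m).countP (fun p => q < p.2) : Int) := by
  set cs := (l.filter (fun p => 0 < p.2)).map (fun p => p.2) with hcs
  set i := (l.take m).countP (fun p => 0 < p.2) with hi
  have hi_le : i ≤ cs.length := by
    rw [hcs, List.length_map, ← List.countP_eq_length_filter, hi]
    exact List.Sublist.countP_le (List.take_sublist m l)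
  rw [pvCnt_take _ _ _ hi_le]
  have h1 : cs.take i = ((l.take m).filter (fun p => 0 < p.2)).map (fun p => p.2) := by
    rw [hcs, ← List.map_take, pvTake_filter (fun p => 0 < p.2) l m, hi]
  rw [h1, List.filter_map, List.length_map, ← List.countP_eq_length_filter,
    List.countP_filter]
  have : ∀ x ∈ l.take m,
      ((fun p => decide (q < p.2) && decide (0 < p.2)) x = true) ↔ (decide (q < x.2) = true) := by
    intro x hx
    simp only [Bool.and_eq_true, decide_eq_true_eq]
    constructor
    · rintro ⟨h1, -⟩; exact h1
    · intro h1; exact ⟨h1, by omega⟩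
  simp only [Function.comp_apply]
  rw [List.countP_congr this]

theorem pv_main (family_limits : List (String × Int)) (region_limit : Int) :
    family_reserve_limits_py family_limits region_limit
      = family_reserve_limits_py_alt family_limits region_limit := by
  simp only [family_reserve_limits_py, family_reserve_limits_py_alt]
  set d := PySem.Dict.ofList family_limits with hd
  set l := d.items with hl
  have hnd : d.keys.Nodup := PySem.Dict.nodup_keys_ofList family_limits
  have hndl : (l.map Prod.fst).Nodup := hnd
  by_cases h0 : region_limit ≤ 0
  · rw [if_pos h0, if_pos h0]
  · rw [if_neg h0, if_neg h0]
    set L := region_limit with hLdef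
    have hL : 0 < L := by omega
    set cs := (l.filter (fun p => 0 < p.2)).map (fun p => p.2) with hcs
    have hcaps_items : (l.foldl (fun r p => r.insert p.1 (max 0 p.2))
        (PySem.Dict.empty (κ := String) (ν := Int))).items
        = l.map (fun p => (p.1, max 0 p.2)) := by
      have := PySem.Dict.items_foldl_insert_fresh l (fun p => p.1) (fun p => max 0 p.2)
        (PySem.Dict.empty (κ := String) (ν := Int))
        (fun a _ => PySem.Dict.contains_empty _) (by exact hndl)
      simpa using this
    have hcapsv : (l.foldl (fun r p => r.insert p.1 (max 0 p.2))
        (PySem.Dict.empty (κ := String) (ν := Int))).values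
        = l.map (fun p => max 0 p.2) := by
      show (l.foldl (fun r p => r.insert p.1 (max 0 p.2))
        (PySem.Dict.empty (κ := String) (ν := Int))).items.map Prod.snd = _
      rw [hcaps_items, List.map_map]
      rfl
    have hdv : d.values.map (fun v => max 0 v) = l.map (fun p => max 0 p.2) := by
      show (l.map Prod.snd).map (fun v => max 0 v) = _
      rw [List.map_map]
      rfl
    have hsum_eq : (l.map (fun p => max 0 p.2)).sum = cs.sum := pvSum_max_filter l
    have hfold : ∀ xs : List Int, xs.foldl (· + ·) 0 = xs.sum := by
      intro xs
      have := PySem.List.foldl_add xs (fun x => x) 0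
      simpa using this
    by_cases h1 : (d.values.map (fun v => max 0 v)).foldl (· + ·) 0 ≤ L
    · rw [if_pos h1, if_pos (by rw [hcapsv, ← hdv]; exact h1)]
    · rw [if_neg h1, if_neg (by rw [hcapsv, ← hdv]; exact h1)]
      have htot : L < cs.sum := by
        rw [hfold, hdv, hsum_eq] at h1
        omega
      -- B side: the sorted positive caps
      have hvals_filter : d.values.filter (fun c => 0 < c)
          = (l.filter (fun p => 0 < p.2)).map (fun p => p.2) := by
        show (l.map (fun p => p.2)).filter (fun c => 0 < c) = _
        rw [List.filter_map]
        rfl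
      set s := PySem.List.sorted (d.values.filter (fun c => 0 < c)) (fun x => x) false with hs
      have hperm : s.Perm cs := by
        rw [hcs, ← hvals_filter]
        exact PySem.List.sorted_perm _ _ _
      have hposcs : ∀ c ∈ cs, 0 < c := by
        intro c hc
        rw [hcs] at hc
        obtain ⟨p, hp, rfl⟩ := List.mem_map.mp hc
        simpa using List.of_mem_filter hp
      have hposS : ∀ x ∈ s, 0 < x := fun x hx => hposcs x (hperm.mem_iff.mp hx)
      have hsortedS : s.Pairwise (· ≤ ·) := by
        have := PySem.List.sorted_pairwise (d.values.filter (fun c => 0 < c)) (fun x => x)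
        simpa [hs] using this
      have hsumS : s.sum = cs.sum := hperm.sum_eq
      obtain ⟨pref', j', qB, hscan, hqdef, hq0B, hB1, hB2, hBk⟩ :=
        pvScan_char L s hposS hL (by omega) hsortedS
      have hallocSC : ∀ x : Int, pvAlloc s x = pvAlloc cs x := fun x => pvAlloc_perm s cs hperm x
      rw [hallocSC] at hB1 hB2 hBk
      -- A side
      obtain ⟨qA, kA, hqA0, hA1, hA2, hkA, hAitems, hAvals, hAz⟩ := pvA_result d L hnd hL htot
      have hqeq : qA = qB := pvAlloc_unique cs L qA qB hA1 hA2 hB1 hB2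
      subst hqeq
      -- rewrite the scan result in the B-side term
      rw [hscan]
      have hbonus : L - pref' - qA * ((s.length - j' : Nat) : Int) = kA := by
        rw [hBk, hkA]
      rw [← hqdef, hbonus]
      have hasg : (pvAssignB qA l kA PySem.Dict.empty).items = pvAsg qA l kA := by
        rw [pvAssignB_items qA l kA PySem.Dict.empty
          (fun p _ => PySem.Dict.contains_empty _) (by exact hndl)]
        rfl
      rw [hasg, hAitems]
      -- pointwise comparison
      have hlenA : ((l.map Prod.fst).map
          (fun key => (key, (pvLoopA d ((l.filter (fun p => 0 < p.2)).map (fun p => p.1))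
              ((L.toNat + 1) * ((l.filter (fun p => 0 < p.2)).map (fun p => p.1)).length)
              (d.keys.foldl (fun r k => r.insert k 0) (PySem.Dict.empty (κ := String) (ν := Int))) 0 L).getD key 0))).length = l.length := by
        simp
      have hlenB : (pvAsg qA l kA).length = l.length := pvAsg_length qA l kA
      apply List.ext_getElem (by rw [hlenA, hlenB])
      intro m hmA hmB
      have hm : m < l.length := by rw [hlenA] at hmA; exact hmA
      set R := pvLoopA d ((l.filter (fun p => 0 < p.2)).map (fun p => p.1))
          ((L.toNat + 1) * ((l.filter (fun p => 0 < p.2)).map (fun p => p.1)).length)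
          (d.keys.foldl (fun r k => r.insert k 0) (PySem.Dict.empty (κ := String) (ν := Int))) 0 L with hR
      have hAentry : ((l.map Prod.fst).map (fun key => (key, R.getD key 0)))[m]'hmA
          = ((l[m]'hm).1, R.getD (l[m]'hm).1 0) := by
        simp
      have hBentry : (pvAsg qA l kA)[m]'hmB
          = ((l.getD m ("", 0)).1,
              if qA < (l.getD m ("", 0)).2 ∧
                  (((l.take m).countP (fun p => qA < p.2) : Nat) : Int) < kA
              then qA + 1 else max 0 (min (l.getD m ("", 0)).2 qA)) := by
        rw [← List.getD_eq_getElem _ ("", 0) hmB, pvAsg_getD qA l kA m hm]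
      rw [hAentry, hBentry, List.getD_eq_getElem _ _ hm]
      by_cases hpm : 0 < (l[m]'hm).2
      · -- positive family: both sides give the water-filling value
        have hpl : (fun p => decide (0 < p.2)) (l.getD m ("", 0)) = true := by
          rw [List.getD_eq_getElem _ _ hm]
          simpa using hpm
        have hilt := (pvFilter_idx (fun p => decide (0 < p.2)) ("", 0) l m hm hpl).1
        have hidx := (pvFilter_idx (fun p => decide (0 < p.2)) ("", 0) l m hm hpl).2
        have hics : (l.take m).countP (fun p => 0 < p.2) < cs.length := by
          rw [hcs, List.length_map]
          exact hilt
        have hnames_i : ((l.filter (fun p => 0 < p.2)).map (fun p => p.1)).getD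
              ((l.take m).countP (fun p => 0 < p.2)) ""
            = (l[m]'hm).1 := by
          rw [List.getD_eq_getElem _ _ (by simpa using hilt), List.getElem_map]
          rw [List.getD_eq_getElem _ _ hilt, List.getD_eq_getElem _ _ hm] at hidx
          rw [hidx]
        have hcs_i : cs.getD ((l.take m).countP (fun p => 0 < p.2)) 0 = (l[m]'hm).2 := by
          rw [hcs, List.getD_eq_getElem _ _ (by simpa using hilt), List.getElem_map]
          rw [List.getD_eq_getElem _ _ hilt, List.getD_eq_getElem _ _ hm] at hidx
          rw [hidx]
        have hval := hAvals ((l.take m).countP (fun p => 0 < p.2)) hics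
        rw [hnames_i] at hval
        rw [hval]
        simp only [pvTgt]
        rw [hcs_i]
        have hcnt := pvCnt_countP l qA hqA0 m hm
        rw [hcnt]
        by_cases hcond : qA < (l[m]'hm).2 ∧
            (((l.take m).countP (fun p => qA < p.2) : Nat) : Int) < kA
        · rw [if_pos hcond, if_pos hcond]
          have : min (l[m]'hm).2 qA = qA := by omega
          rw [this]
        · rw [if_neg hcond, if_neg hcond]
          have : max 0 (min (l[m]'hm).2 qA) = min (l[m]'hm).2 qA := by omega
          rw [this, add_zero]
      · -- non-positive family: 0 on both sides
        push_neg at hpm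
        have hz := hAz (l[m]'hm) (List.getElem_mem _) hpm
        rw [hz]
        rw [if_neg (by rintro ⟨hq1, -⟩; omega)]
        have : max 0 (min (l[m]'hm).2 qA) = 0 := by omega
        rw [this]

-- ===== VERDICT (by name: the statement is the Claim_ definition above) =====
theorem family_reserve_limits_py_spec : Claim_equal_family_reserve_limits_py := by
  intro family_limits region_limit _
  exact pv_main family_limits region_limit
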